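-- pv_equiv track=rewrite | github.com/natethegreatMD/CasewiseMD | case-management/src/tcia_ingestion.py | _generate_learning_objectives
-- ===== SOURCE A (Python) =====
-- from typing import Dict, List, Optional, Any, Tuple
--
-- def _generate_learning_objectives(patient_metadata: List[Dict[str, Any]]) -> List[str]:
--     """
--     Generate learning objectives based on case findings.
--
--     Args:
--         patient_metadata: List of expert reviews
--
--     Returns:
--         List of learning objectives
--     """
--     objectives = [
--         "Identify primary ovarian mass characteristics",
--         "Assess peritoneal disease spread patterns",
--         "Evaluate nodal involvement"
--     ]
--
--     if not patient_metadata: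
--         return objectives
--
--     # Add specific objectives based on findings
--     common_findings = set()
--
--     for review in patient_metadata:
--         findings = review.get('findings', {})
--
--         # Check for specific findings
--         if findings.get('metastatic_disease', {}).get('LiverMets'):
--             common_findings.add("liver_metastases")
--         if findings.get('metastatic_disease', {}).get('LungMets'):
--             common_findings.add("lung_metastases")
--         if findings.get('additional', {}).get('Ascites') not in ['None', None]:
--             common_findings.add("ascites")
--         if findings.get('additional', {}).get('PleuralEffusionSize') not in ['None', None]:
--             common_findings.add("pleural_effusion")
--
--     # Add specific objectives
--     if "liver_metastases" in common_findings:
--         objectives.append("Recognize hepatic metastases")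
--     if "lung_metastases" in common_findings:
--         objectives.append("Identify pulmonary metastases")
--     if "ascites" in common_findings:
--         objectives.append("Assess ascites volume and distribution")
--     if "pleural_effusion" in common_findings:
--         objectives.append("Evaluate pleural effusion")
--
--     return objectives
-- ===== SOURCE B (Python) =====
-- from typing import Dict, List, Optional, Any, Tuple
--
-- def _generate_learning_objectives(patient_metadata: List[Dict[str, Any]]) -> List[str]:
--     """Same result as A, but tests each optional objective with a direct any() pass
--     instead of accumulating a common_findings set in one combined loop."""
--     objectives = [
--         "Identify primary ovarian mass characteristics",
--         "Assess peritoneal disease spread patterns",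
--         "Evaluate nodal involvement"
--     ]
--
--     if not patient_metadata:
--         return objectives
--
--     if any(r.get('findings', {}).get('metastatic_disease', {}).get('LiverMets')
--            for r in patient_metadata):
--         objectives.append("Recognize hepatic metastases")
--     if any(r.get('findings', {}).get('metastatic_disease', {}).get('LungMets')
--            for r in patient_metadata):
--         objectives.append("Identify pulmonary metastases")
--     if any(r.get('findings', {}).get('additional', {}).get('Ascites') not in ['None', None]
--            for r in patient_metadata):
--         objectives.append("Assess ascites volume and distribution")
--     if any(r.get('findings', {}).get('additional', {}).get('PleuralEffusionSize') not in ['None', None]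
--            for r in patient_metadata):
--         objectives.append("Evaluate pleural effusion")
--
--     return objectives
-- ===== Notes on version B (the rewrite author's own statement) =====
-- stated objective: simpler
-- what changed: Replaces the accumulated common_findings set and the subsequent four membership tests with four direct any() passes over patient_metadata, one per optional objective, appending in the same fixed order.
import Mathlib
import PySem

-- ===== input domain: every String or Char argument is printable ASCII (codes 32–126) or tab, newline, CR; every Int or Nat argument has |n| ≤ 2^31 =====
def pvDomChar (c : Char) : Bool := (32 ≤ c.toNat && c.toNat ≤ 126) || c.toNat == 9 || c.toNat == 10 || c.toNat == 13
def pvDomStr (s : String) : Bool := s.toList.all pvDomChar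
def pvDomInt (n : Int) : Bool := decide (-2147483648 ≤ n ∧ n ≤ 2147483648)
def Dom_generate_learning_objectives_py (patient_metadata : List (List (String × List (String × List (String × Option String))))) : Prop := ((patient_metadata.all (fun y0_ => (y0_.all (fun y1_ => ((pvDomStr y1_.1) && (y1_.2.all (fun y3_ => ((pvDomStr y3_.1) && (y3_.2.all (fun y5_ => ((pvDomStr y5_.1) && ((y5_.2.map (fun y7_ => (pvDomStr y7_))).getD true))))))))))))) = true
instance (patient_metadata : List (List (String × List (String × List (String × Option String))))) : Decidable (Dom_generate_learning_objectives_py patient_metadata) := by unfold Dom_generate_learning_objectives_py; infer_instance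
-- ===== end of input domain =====

-- ===== PORT A =====
-- B replaces A's accumulated common_findings set + membership tests by four direct any-passes (objective: simpler).
-- shared literal helpers: the nested review.get('findings',{}).get(k1,{}).get(k2) chain and the two Python predicates,
-- identical text in both sources
def pvSub (review : List (String × List (String × List (String × Option String)))) (key1 key2 : String) : Option (Option String) :=
  (PySem.Dict.mk ((PySem.Dict.mk ((PySem.Dict.mk review).getD "findings" [])).getD key1 [])).get? key2

-- Python truthiness of an Optional[str]: non-missing, non-None, non-empty
def pvTruthyOpt (o : Option (Option String)) : Bool :=
  match o with | some (some s) => s != "" | _ => false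

-- Python `v not in ['None', None]` for v = .get(key2): non-missing, non-None, not the string "None"
def pvNotNoneOpt (o : Option (Option String)) : Bool :=
  match o with | some (some s) => s != "None" | _ => false

def pvLiver (r : List (String × List (String × List (String × Option String)))) : Bool :=
  pvTruthyOpt (pvSub r "metastatic_disease" "LiverMets")
def pvLung (r : List (String × List (String × List (String × Option String)))) : Bool :=
  pvTruthyOpt (pvSub r "metastatic_disease" "LungMets")
def pvAsc (r : List (String × List (String × List (String × Option String)))) : Bool :=
  pvNotNoneOpt (pvSub r "additional" "Ascites")
def pvPle (r : List (String × List (String × List (String × Option String)))) : Bool :=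
  pvNotNoneOpt (pvSub r "additional" "PleuralEffusionSize")

-- A's loop body: the four conditional set.add calls on common_findings
def pvStepA (cf : PySem.Set String) (review : List (String × List (String × List (String × Option String)))) : PySem.Set String :=
  let cf := if pvLiver review then PySem.Set.add cf "liver_metastases" else cf
  let cf := if pvLung review then PySem.Set.add cf "lung_metastases" else cf
  let cf := if pvAsc review then PySem.Set.add cf "ascites" else cf
  if pvPle review then PySem.Set.add cf "pleural_effusion" else cf

def generate_learning_objectives_py (patient_metadata : List (List (String × List (String × List (String × Option String))))) : List String :=
  let objectives := ["Identify primary ovarian mass characteristics",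
                     "Assess peritoneal disease spread patterns",
                     "Evaluate nodal involvement"]
  if patient_metadata = [] then objectives else
  let common_findings : PySem.Set String := patient_metadata.foldl pvStepA PySem.Set.empty
  let objectives := if PySem.Set.contains common_findings "liver_metastases" then objectives ++ ["Recognize hepatic metastases"] else objectives
  let objectives := if PySem.Set.contains common_findings "lung_metastases" then objectives ++ ["Identify pulmonary metastases"] else objectives
  let objectives := if PySem.Set.contains common_findings "ascites" then objectives ++ ["Assess ascites volume and distribution"] else objectives
  let objectives := if PySem.Set.contains common_findings "pleural_effusion" then objectives ++ ["Evaluate pleural effusion"] else objectives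
  objectives

-- ===== PORT B =====
def generate_learning_objectives_py_alt (patient_metadata : List (List (String × List (String × List (String × Option String))))) : List String :=
  let objectives := ["Identify primary ovarian mass characteristics",
                     "Assess peritoneal disease spread patterns",
                     "Evaluate nodal involvement"]
  if patient_metadata = [] then objectives else
  let objectives := if patient_metadata.any pvLiver then objectives ++ ["Recognize hepatic metastases"] else objectives
  let objectives := if patient_metadata.any pvLung then objectives ++ ["Identify pulmonary metastases"] else objectives
  let objectives := if patient_metadata.any pvAsc then objectives ++ ["Assess ascites volume and distribution"] else objectives
  let objectives := if patient_metadata.any pvPle then objectives ++ ["Evaluate pleural effusion"] else objectives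
  objectives

-- ===== PRECONDITION & SPEC =====
def Spec_generate_learning_objectives_py (patient_metadata : List (List (String × List (String × List (String × Option String))))) (out : List String) : Prop := out = generate_learning_objectives_py_alt patient_metadata
instance (patient_metadata : List (List (String × List (String × List (String × Option String))))) (out : List String) : Decidable (Spec_generate_learning_objectives_py patient_metadata out) := by unfold Spec_generate_learning_objectives_py; infer_instance

-- ===== CLAIM (what is proved, stated in full; the proofs are below) =====
def Claim_equal_generate_learning_objectives_py : Prop := ∀ (patient_metadata : List (List (String × List (String × List (String × Option String))))), Dom_generate_learning_objectives_py patient_metadata → Spec_generate_learning_objectives_py patient_metadata (generate_learning_objectives_py patient_metadata)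

-- ===== LEMMAS AND PROOFS =====
theorem pv_mem_stepA {t : String} (s : PySem.Set String)
    (r : List (String × List (String × List (String × Option String))))
    (ht : t = "liver_metastases" ∨ t = "lung_metastases" ∨ t = "ascites" ∨ t = "pleural_effusion") :
    (t ∈ pvStepA s r) ↔
      ((t = "liver_metastases" ∧ pvLiver r = true) ∨ (t = "lung_metastases" ∧ pvLung r = true) ∨
       (t = "ascites" ∧ pvAsc r = true) ∨ (t = "pleural_effusion" ∧ pvPle r = true) ∨ t ∈ s) := by
  unfold pvStepA
  rcases ht with h | h | h | h <;> subst h <;>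
    split_ifs <;> simp_all [PySem.Set.mem_add]

set_option maxHeartbeats 1000000 in
theorem pv_mem_fold {t : String} (pm : List (List (String × List (String × List (String × Option String)))))
    (s : PySem.Set String)
    (ht : t = "liver_metastases" ∨ t = "lung_metastases" ∨ t = "ascites" ∨ t = "pleural_effusion") :
    (t ∈ pm.foldl pvStepA s) ↔
      ((t = "liver_metastases" ∧ pm.any pvLiver = true) ∨ (t = "lung_metastases" ∧ pm.any pvLung = true) ∨
       (t = "ascites" ∧ pm.any pvAsc = true) ∨ (t = "pleural_effusion" ∧ pm.any pvPle = true) ∨ t ∈ s) := by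
  induction pm generalizing s with
  | nil => simp
  | cons r rest ih =>
    rw [List.foldl_cons, ih (pvStepA s r), pv_mem_stepA s r ht]
    simp only [List.any_cons, Bool.or_eq_true]
    tauto

theorem pv_contains_fold (pm : List (List (String × List (String × List (String × Option String)))))
    (t : String)
    (ht : t = "liver_metastases" ∨ t = "lung_metastases" ∨ t = "ascites" ∨ t = "pleural_effusion") :
    PySem.Set.contains (pm.foldl pvStepA PySem.Set.empty) t =
      ((t = "liver_metastases" ∧ pm.any pvLiver = true) ∨ (t = "lung_metastases" ∧ pm.any pvLung = true) ∨
       (t = "ascites" ∧ pm.any pvAsc = true) ∨ (t = "pleural_effusion" ∧ pm.any pvPle = true) : Bool) := by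
  have h := pv_mem_fold pm PySem.Set.empty ht
  simp [PySem.Set.empty] at h
  simp [PySem.Set.contains, h]

-- ===== VERDICT (by name: the statement is the Claim_ definition above) =====
theorem generate_learning_objectives_py_spec : Claim_equal_generate_learning_objectives_py := by
  intro pm _
  unfold Spec_generate_learning_objectives_py generate_learning_objectives_py generate_learning_objectives_py_alt
  by_cases hpm : pm = []
  · simp [hpm]
  · simp only [if_neg hpm]
    rw [pv_contains_fold pm _ (Or.inl rfl),
        pv_contains_fold pm _ (Or.inr (Or.inl rfl)),
        pv_contains_fold pm _ (Or.inr (Or.inr (Or.inl rfl))),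
        pv_contains_fold pm _ (Or.inr (Or.inr (Or.inr rfl)))]
    simp
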